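-- pv_equiv track=rewrite | github.com/IlariaCattaneo/Algorithms-Data-Structures | Algo_exercises/Esercizi_preparazione_esame/ex_206.py | better_algo_x
-- ===== SOURCE A (Python) =====
-- def better_algo_x(A,x):
--     if len(A) < 2:
--         return False
--     max = A[0]
--     min = A[0]
--     for num in A:
--         if num < min:
--             min = num
--         elif num > max:
--             max = num
--     return max - min > x
-- ===== SOURCE B (Python) =====
-- def better_algo_x(A, x):
--     if len(A) < 2:
--         return False
--     s = sorted(A)
--     return s[-1] - s[0] > x
-- ===== Notes on version B (the rewrite author's own statement) =====
-- stated objective: alternative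
-- what changed: Replaces the single-pass elif loop tracking both running extremes with sort-then-endpoints: sort the list once and compare last minus first element against x.
import Mathlib
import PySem

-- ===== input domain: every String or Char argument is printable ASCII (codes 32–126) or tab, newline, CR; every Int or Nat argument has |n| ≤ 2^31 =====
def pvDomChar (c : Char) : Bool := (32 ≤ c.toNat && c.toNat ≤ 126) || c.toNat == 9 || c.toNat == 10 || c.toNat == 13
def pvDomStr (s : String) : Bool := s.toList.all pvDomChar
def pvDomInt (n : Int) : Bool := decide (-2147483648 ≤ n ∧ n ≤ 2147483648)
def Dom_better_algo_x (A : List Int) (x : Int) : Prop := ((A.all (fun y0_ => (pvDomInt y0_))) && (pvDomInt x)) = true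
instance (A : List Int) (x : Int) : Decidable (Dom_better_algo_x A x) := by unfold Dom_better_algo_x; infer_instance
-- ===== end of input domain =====

-- B replaces A's single-pass elif min/max loop with sort-then-endpoints: sort the list once and compare last − first against x (alternative).


-- ===== PORT A =====
-- A's loop state (mx, mn); branch order as in Python: if num < mn then mn := num elif num > mx then mx := num
def betterStep (s : Int × Int) (num : Int) : Int × Int :=
  if num < s.2 then (s.1, num) else if num > s.1 then (num, s.2) else s

def better_algo_x (A : List Int) (x : Int) : Bool :=
  if A.length < 2 then false
  else
    match A with
    | [] => false
    | a :: rest =>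
      let s := (a :: rest).foldl betterStep (a, a)
      s.1 - s.2 > x

-- ===== PORT B =====
-- sorted(A) → PySem.List.sorted; s[-1], s[0] → pyGet? (the nonempty guard makes both 'some')
def better_algo_x_alt (A : List Int) (x : Int) : Bool :=
  if A.length < 2 then false
  else
    let s := PySem.List.sorted A (fun v => v) false
    match PySem.List.pyGet? s (-1), PySem.List.pyGet? s 0 with
    | some hi, some lo => hi - lo > x
    | _, _ => false

-- ===== PRECONDITION & SPEC =====
def Spec_better_algo_x (A : List Int) (x : Int) (out : Bool) : Prop := out = better_algo_x_alt A x
instance (A : List Int) (x : Int) (out : Bool) : Decidable (Spec_better_algo_x A x out) := by unfold Spec_better_algo_x; infer_instance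

-- ===== CLAIM (what is proved, stated in full; the proofs are below) =====
def Claim_equal_better_algo_x : Prop := ∀ (A : List Int) (x : Int), Dom_better_algo_x A x → Spec_better_algo_x A x (better_algo_x A x)

-- ===== LEMMAS AND PROOFS =====

-- the loop fold computes (fold max, fold min) whenever the starting state is ordered
theorem betterStep_fold (l : List Int) (mx mn : Int) (h : mn ≤ mx) :
    l.foldl betterStep (mx, mn) = (l.foldl max mx, l.foldl min mn) := by
  induction l generalizing mx mn with
  | nil => simp
  | cons num t ih =>
    simp only [List.foldl_cons]
    have hstep : betterStep (mx, mn) num = (max mx num, min mn num) := by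
      unfold betterStep; dsimp only; split_ifs <;> simp <;> omega
    rw [hstep, ih _ _ (by omega)]

theorem fold_min_mem (l : List Int) (a : Int) : l.foldl min a ∈ a :: l := by
  induction l generalizing a with
  | nil => simp
  | cons b t ih =>
    rw [List.foldl_cons]
    rcases List.mem_cons.1 (ih (min a b)) with h | h
    · rw [h]; rcases min_choice a b with hc | hc <;> simp [hc]
    · simp [h]

theorem fold_min_le (l : List Int) (a : Int) : ∀ y ∈ a :: l, l.foldl min a ≤ y := by
  induction l generalizing a with
  | nil => simp
  | cons b t ih =>
    intro y hy
    simp only [List.foldl_cons]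
    rcases List.mem_cons.1 hy with rfl | hy
    · exact le_trans (ih _ _ (List.mem_cons_self)) (min_le_left _ _)
    · rcases List.mem_cons.1 hy with rfl | hy
      · exact le_trans (ih _ _ (List.mem_cons_self)) (min_le_right _ _)
      · exact ih _ _ (List.mem_cons.2 (Or.inr hy))

theorem fold_max_mem (l : List Int) (a : Int) : l.foldl max a ∈ a :: l := by
  induction l generalizing a with
  | nil => simp
  | cons b t ih =>
    rw [List.foldl_cons]
    rcases List.mem_cons.1 (ih (max a b)) with h | h
    · rw [h]; rcases max_choice a b with hc | hc <;> simp [hc]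
    · simp [h]

theorem fold_max_ge (l : List Int) (a : Int) : ∀ y ∈ a :: l, y ≤ l.foldl max a := by
  induction l generalizing a with
  | nil => simp
  | cons b t ih =>
    intro y hy
    simp only [List.foldl_cons]
    rcases List.mem_cons.1 hy with rfl | hy
    · exact le_trans (le_max_left _ _) (ih _ _ (List.mem_cons_self))
    · rcases List.mem_cons.1 hy with rfl | hy
      · exact le_trans (le_max_right _ _) (ih _ _ (List.mem_cons_self))
      · exact ih _ _ (List.mem_cons.2 (Or.inr hy))

-- every element of the sorted list is ≤ its last element
theorem sorted_le_last (A : List Int) (hne : (PySem.List.sorted A (fun v => v) false).length ≠ 0) :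
    ∀ y ∈ PySem.List.sorted A (fun v => v) false,
      y ≤ (PySem.List.sorted A (fun v => v) false)[(PySem.List.sorted A (fun v => v) false).length - 1]'(by omega) := by
  intro y hy
  obtain ⟨i, hi, rfl⟩ := List.getElem_of_mem hy
  exact PySem.List.sorted_id_getElem_mono (xs := A) (p := i) (q := (PySem.List.sorted A (fun v => v) false).length - 1)
    (by omega) (by omega)

theorem better_algo_x_spec : Claim_equal_better_algo_x := by
  intro A x _
  unfold Spec_better_algo_x better_algo_x better_algo_x_alt
  by_cases hlen : A.length < 2
  · simp [hlen]
  · match A, hlen with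
    | a :: rest, hlen =>
      simp only [if_neg hlen, List.foldl_cons]
      have hstep0 : betterStep (a, a) a = (a, a) := by
        unfold betterStep; simp
      simp only [hstep0, betterStep_fold rest a a le_rfl]
      -- the sorted list
      set s := PySem.List.sorted (a :: rest) (fun v => v) false with hs
      have hperm : s.Perm (a :: rest) := PySem.List.sorted_perm _ _ _
      have hslen : s.length = rest.length + 1 := by
        simpa using hperm.length_eq
      have hne : s.length ≠ 0 := by omega
      -- head and last of s
      obtain ⟨m, t, hmt⟩ : ∃ m t, s = m :: t := by
        cases hcs : s with
        | nil => rw [hcs] at hne; simp at hne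
        | cons m t => exact ⟨m, t, rfl⟩
      have hget0 : PySem.List.pyGet? s 0 = some m := by
        rw [hmt]; exact PySem.List.pyGet?_zero_cons m t
      have hlast : PySem.List.pyGet? s (-1) = some (s[s.length - 1]'(by omega)) := by
        rw [PySem.List.pyGet?_neg_one, List.getLast?_eq_getElem?]
        simp [List.getElem?_eq_getElem (by omega : s.length - 1 < s.length)]
      rw [hget0, hlast]
      -- identify head with fold min
      have hmem_iff : ∀ y, y ∈ s ↔ y ∈ a :: rest := fun y => hperm.mem_iff
      have hmin_le : ∀ y ∈ a :: rest, m ≤ y :=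
        PySem.List.key_head_sorted_le (xs := a :: rest) (key := fun v => v) hmt
      have hmin_eq : rest.foldl min a = m := by
        have h1 : rest.foldl min a ≤ m := by
          apply fold_min_le
          exact (hmem_iff m).1 (hmt ▸ List.mem_cons_self)
        have h2 : m ≤ rest.foldl min a := hmin_le _ (fold_min_mem rest a)
        omega
      -- identify last with fold max
      set L := s[s.length - 1]'(by omega) with hL
      have hmax_le : ∀ y ∈ a :: rest, y ≤ L := by
        intro y hy
        exact sorted_le_last (a :: rest) (by simpa [← hs] using hne) y ((hmem_iff y).2 hy)
      have hmax_eq : rest.foldl max a = L := by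
        have h1 : rest.foldl max a ≤ L := hmax_le _ (fold_max_mem rest a)
        have h2 : L ≤ rest.foldl max a := by
          apply fold_max_ge
          exact (hmem_iff L).1 (List.getElem_mem _)
        omega
      simp [hmin_eq, hmax_eq]
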